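-- pv_equiv track=rewrite | github.com/alexeygalt/inst_deploy | utils.py | get_tags_words
-- ===== SOURCE A (Python) =====
-- def get_tags_words(key_list) -> list:
--     """Добавление ссылок на все слова хэштеги в посте"""
--     result = []
--     for key in key_list:
--         for item in key['content'].split():
--             if item.startswith('#'):
--                 result.append(f'<a href="/tag/{item[1:]}">{item}</a>')
--             else:
--                 result.append(item)
--
--     key_str = ' '.join(result)
--     key_list[0]['content'] = key_str
--     return key_list
-- ===== SOURCE B (Python) =====
-- def get_tags_words(key_list) -> list:
--     """Single streaming scan over the joined text instead of split/append/join per word."""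
--     text = ' '.join(key['content'] for key in key_list)
--     res = []
--     i, n = 0, len(text)
--     while i < n:
--         if text[i].isspace():
--             i += 1
--             continue
--         j = i
--         while j < n and not text[j].isspace():
--             j += 1
--         tok = text[i:j]
--         if res:
--             res.append(' ')
--         if tok.startswith('#'):
--             res.append(f'<a href="/tag/{tok[1:]}">{tok}</a>')
--         else:
--             res.append(tok)
--         i = j
--     key_list[0]['content'] = ''.join(res)
--     return key_list
-- ===== Notes on version B (the rewrite author's own statement) =====
-- stated objective: alternative
-- what changed: A splits each post into words, branches and appends word by word into a list, then ' '.joins; B builds the joined text once and runs a single streaming index scan over its characters, emitting separators and wrapped tokens directly into the output pieces.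
import Mathlib
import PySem

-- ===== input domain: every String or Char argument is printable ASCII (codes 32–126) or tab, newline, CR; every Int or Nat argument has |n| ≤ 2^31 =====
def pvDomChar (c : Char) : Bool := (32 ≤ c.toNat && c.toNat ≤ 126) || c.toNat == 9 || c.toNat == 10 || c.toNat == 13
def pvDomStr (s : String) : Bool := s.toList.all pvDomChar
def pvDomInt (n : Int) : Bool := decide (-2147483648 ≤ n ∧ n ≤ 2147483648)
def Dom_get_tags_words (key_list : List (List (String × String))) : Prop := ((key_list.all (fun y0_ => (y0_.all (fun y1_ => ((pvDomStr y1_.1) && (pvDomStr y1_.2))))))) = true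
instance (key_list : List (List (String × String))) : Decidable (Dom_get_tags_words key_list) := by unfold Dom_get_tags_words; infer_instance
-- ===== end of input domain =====

-- B replaces A's per-word split/branch/append loops plus final join by ONE streaming scan over the
-- joined text that emits wrapped tokens and separators directly (objective: alternative, same cost).
-- Both A and B mutate key_list[0]['content'] in place in Python; the equivalence is about the return value
-- (which is the mutated list, and both perform the identical mutation).

-- shared dict helpers: key['content'] (first match; Pre_ guarantees the key is present, so the
-- "" default is never used) and key_list[0]['content'] = v (overwrite first matching pair in place)
def pvGetContent (key : List (String × String)) : String :=
  (((key.find? (fun p => p.1 == "content")).map (·.2)).getD "")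

def pvSetContent : List (String × String) → String → List (String × String)
  | [], v => [("content", v)]
  | p :: rest, v => if p.1 == "content" then (p.1, v) :: rest else p :: pvSetContent rest v

-- shared: the identical f-string '<a href="/tag/{item[1:]}">{item}</a>' in both Pythons
-- (item[1:] = List.drop 1, exact for the literal nonnegative index 1)
def pvWrap (item : List Char) : List Char :=
  "<a href=\"/tag/".toList ++ item.drop 1 ++ "\">".toList ++ item ++ "</a>".toList

-- ===== PORT A =====
def get_tags_words (key_list : List (List (String × String))) : List (List (String × String)) :=
  let result : List (List Char) :=
    key_list.foldl (fun res key =>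
      (PySem.Chars.split₀ (pvGetContent key).toList).foldl (fun res item =>
        if PySem.Chars.startswith item "#".toList then res ++ [pvWrap item]
        else res ++ [item]) res) []
  let key_str := PySem.Chars.join [' '] result
  match key_list with
  | [] => []        -- unreachable: Pre_ excludes [] (Python raises IndexError)
  | k0 :: ks => pvSetContent k0 (String.ofList key_str) :: ks

-- ===== PORT B =====
def pvNotSpace (c : Char) : Bool := !PySem.Chars.isspace c

-- the while-loop of Source B: skip whitespace; the inner while (j advance) + slice text[i:j] is
-- takeWhile/dropWhile of the non-space run; append separator and (wrapped) token pieces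
def pvScan (text : List Char) (res : List (List Char)) : List (List Char) :=
  match text with
  | [] => res
  | c :: rest =>
    if PySem.Chars.isspace c then pvScan rest res
    else
      let tok := List.takeWhile pvNotSpace (c :: rest)
      let rest' := List.dropWhile pvNotSpace (c :: rest)
      let res' := if res.isEmpty then res else res ++ [[' ']]
      pvScan rest' (res' ++ [if PySem.Chars.startswith tok "#".toList then pvWrap tok else tok])
  termination_by text.length
  decreasing_by
    · simp only [List.length_cons]
      omega
    · have hc : pvNotSpace c = true := by simp [pvNotSpace, *]
      have hdw : List.dropWhile pvNotSpace (c :: rest) = List.dropWhile pvNotSpace rest := by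
        rw [List.dropWhile_cons, hc]
        simp
      rw [hdw]
      simp only [List.length_cons]
      exact Nat.lt_succ_of_le (List.length_dropWhile_le _ _)

def get_tags_words_alt (key_list : List (List (String × String))) : List (List (String × String)) :=
  let text := PySem.Chars.join [' '] (key_list.map (fun key => (pvGetContent key).toList))
  let key_str := PySem.Chars.join [] (pvScan text [])
  match key_list with
  | [] => []        -- unreachable: Pre_ excludes [] (Python raises IndexError)
  | k0 :: ks => pvSetContent k0 (String.ofList key_str) :: ks

-- ===== PRECONDITION & SPEC =====
-- Pre_ excludes exactly the inputs where Python A raises: the empty list (IndexError on key_list[0])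
-- and any dict missing the 'content' key (KeyError).
def Pre_get_tags_words (key_list : List (List (String × String))) : Prop :=
  key_list ≠ [] ∧ ∀ key ∈ key_list, "content" ∈ key.map Prod.fst
instance (key_list : List (List (String × String))) : Decidable (Pre_get_tags_words key_list) := by
  unfold Pre_get_tags_words; infer_instance

def pvWitness_get_tags_words : (List (List (String × String))) := [[("content", "hello #tag")]]

def Spec_get_tags_words (key_list : List (List (String × String))) (out : List (List (String × String))) : Prop := out = get_tags_words_alt key_list
instance (key_list : List (List (String × String))) (out : List (List (String × String))) : Decidable (Spec_get_tags_words key_list out) := by unfold Spec_get_tags_words; infer_instance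

-- ===== CLAIM (what is proved, stated in full; the proofs are below) =====
def Claim_equal_get_tags_words : Prop := ∀ (key_list : List (List (String × String))), Dom_get_tags_words key_list → Pre_get_tags_words key_list → Spec_get_tags_words key_list (get_tags_words key_list)

-- ===== LEMMAS AND PROOFS =====

-- the word transform both programs apply to each token
def pvProc (item : List Char) : List Char :=
  if PySem.Chars.startswith item "#".toList then pvWrap item else item

-- A's inner foldl appends pvProc of each word
theorem pv_inner_foldl (l : List (List Char)) (acc : List (List Char)) :
    l.foldl (fun res item =>
      if PySem.Chars.startswith item "#".toList then res ++ [pvWrap item]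
      else res ++ [item]) acc = acc ++ l.map pvProc := by
  induction l generalizing acc with
  | nil => simp
  | cons x xs ih =>
    simp only [List.foldl_cons, List.map_cons, ih, pvProc]
    split <;> simp

-- A's outer foldl flatMaps
theorem pv_outer_foldl (kl : List (List (String × String))) (acc : List (List Char)) :
    kl.foldl (fun res key =>
      (PySem.Chars.split₀ (pvGetContent key).toList).foldl (fun res item =>
        if PySem.Chars.startswith item "#".toList then res ++ [pvWrap item]
        else res ++ [item]) res) acc
    = acc ++ (kl.flatMap (fun key => PySem.Chars.split₀ (pvGetContent key).toList)).map pvProc := by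
  induction kl generalizing acc with
  | nil => simp
  | cons k ks ih =>
    simp only [List.foldl_cons, List.flatMap_cons, List.map_append]
    rw [pv_inner_foldl, ih, List.append_assoc]

-- ---- split₀ characterisation ----

theorem pv_go_acc (cs : List Char) : ∀ cur acc, PySem.Chars.split₀.go cs cur acc
    = acc.reverse ++ PySem.Chars.split₀.go cs cur [] := by
  induction cs with
  | nil =>
    intro cur acc
    simp only [PySem.Chars.split₀.go]
    by_cases h : cur.isEmpty <;> simp [h]
  | cons c rest ih =>
    intro cur acc
    simp only [PySem.Chars.split₀.go]
    by_cases hs : PySem.Chars.isspace c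
    · by_cases h : cur.isEmpty
      · simp only [hs, h, if_true]
        exact ih [] acc
      · simp only [hs, h, if_true]
        rw [ih [] (cur.reverse :: acc), ih [] [cur.reverse]]
        simp
    · simp only [hs]
      exact ih (c :: cur) acc

theorem pv_go_take (cs : List Char) : ∀ cur acc, PySem.Chars.split₀.go cs cur acc
    = PySem.Chars.split₀.go (cs.dropWhile pvNotSpace) ((cs.takeWhile pvNotSpace).reverse ++ cur) acc := by
  induction cs with
  | nil => intro cur acc; simp
  | cons c rest ih =>
    intro cur acc
    by_cases hs : PySem.Chars.isspace c
    · have : pvNotSpace c = false := by simp [pvNotSpace, hs]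
      simp [List.takeWhile_cons, this]
    · have hns : pvNotSpace c = true := by simp [pvNotSpace, hs]
      rw [List.dropWhile_cons, List.takeWhile_cons]
      simp only [hns, if_true]
      have hgo : PySem.Chars.split₀.go (c :: rest) cur acc
          = PySem.Chars.split₀.go rest (c :: cur) acc := by
        simp only [PySem.Chars.split₀.go, hs]
        simp
      rw [hgo, ih (c :: cur) acc]
      simp

theorem pv_split_space {c : Char} (h : PySem.Chars.isspace c = true) (cs : List Char) :
    PySem.Chars.split₀ (c :: cs) = PySem.Chars.split₀ cs := by
  simp only [PySem.Chars.split₀, PySem.Chars.split₀.go, h]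
  simp

-- the head of dropWhile fails the predicate
theorem pv_dropWhile_head (p : Char → Bool) (cs : List Char) :
    (cs.dropWhile p) = [] ∨ ∃ s ds, cs.dropWhile p = s :: ds ∧ p s = false := by
  induction cs with
  | nil => exact Or.inl rfl
  | cons c rest ih =>
    rw [List.dropWhile_cons]
    by_cases h : p c
    · simpa [h] using ih
    · exact Or.inr ⟨c, rest, by simp [h], by simp [h]⟩

theorem pv_split_tok {c : Char} (h : PySem.Chars.isspace c = false) (cs : List Char) :
    PySem.Chars.split₀ (c :: cs)
      = (c :: cs).takeWhile pvNotSpace :: PySem.Chars.split₀ ((c :: cs).dropWhile pvNotSpace) := by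
  have hns : pvNotSpace c = true := by simp [pvNotSpace, h]
  have h1 : PySem.Chars.split₀ (c :: cs)
      = PySem.Chars.split₀.go ((c :: cs).dropWhile pvNotSpace)
          (((c :: cs).takeWhile pvNotSpace).reverse ++ []) [] := by
    rw [PySem.Chars.split₀, pv_go_take]
  rw [h1]
  have htok : (c :: cs).takeWhile pvNotSpace = c :: cs.takeWhile pvNotSpace := by
    simp [List.takeWhile_cons, hns]
  rcases pv_dropWhile_head pvNotSpace (c :: cs) with hd | ⟨s, ds, hd, hps⟩
  · rw [hd, htok]
    simp only [List.append_nil, PySem.Chars.split₀.go]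
    simp [PySem.Chars.split₀, PySem.Chars.split₀.go]
  · have hss : PySem.Chars.isspace s = true := by
      simpa [pvNotSpace] using hps
    rw [hd, htok]
    have hgo1 : PySem.Chars.split₀.go (s :: ds) ((c :: List.takeWhile pvNotSpace cs).reverse ++ []) []
        = PySem.Chars.split₀.go ds [] [c :: List.takeWhile pvNotSpace cs] := by
      simp only [List.append_nil, PySem.Chars.split₀.go, hss]
      simp
    rw [hgo1, pv_go_acc]
    have hgo2 : PySem.Chars.split₀.go (s :: ds) ([] : List Char) [] = PySem.Chars.split₀.go ds [] [] := by
      simp only [PySem.Chars.split₀.go, hss]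
      simp
    simp [PySem.Chars.split₀, hgo2]

theorem pv_split_nil : PySem.Chars.split₀ [] = [] := rfl

theorem pv_split_append : ∀ (n : Nat) (a : List Char), a.length ≤ n → ∀ b,
    PySem.Chars.split₀ (a ++ ' ' :: b) = PySem.Chars.split₀ a ++ PySem.Chars.split₀ b := by
  intro n
  induction n with
  | zero =>
    intro a ha b
    have : a = [] := List.length_eq_zero_iff.mp (Nat.le_zero.mp ha)
    subst this
    rw [List.nil_append, pv_split_space (show PySem.Chars.isspace ' ' = true by decide),
      pv_split_nil, List.nil_append]
  | succ n ih =>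
    intro a ha b
    match a with
    | [] =>
      rw [List.nil_append, pv_split_space (show PySem.Chars.isspace ' ' = true by decide),
        pv_split_nil, List.nil_append]
    | c :: a' =>
      by_cases hs : PySem.Chars.isspace c
      · rw [List.cons_append, pv_split_space hs, pv_split_space hs]
        exact ih a' (by simpa using Nat.le_of_succ_le_succ ha) b
      · have hs' : PySem.Chars.isspace c = false := by simpa using hs
        rw [List.cons_append, pv_split_tok hs', pv_split_tok hs', ← List.cons_append]
        have hns : pvNotSpace ' ' = false := by decide
        have htake : (c :: a' ++ ' ' :: b).takeWhile pvNotSpace = (c :: a').takeWhile pvNotSpace := by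
          rw [List.takeWhile_append]
          split
          · rename_i hlen
            have : (c :: a').takeWhile pvNotSpace = c :: a' :=
              (List.takeWhile_prefix _).eq_of_length hlen
            simp [hns, this]
          · rfl
        have hdropE : ((c :: a').dropWhile pvNotSpace).isEmpty = true →
            (c :: a').dropWhile pvNotSpace = [] := by
          intro h; simpa [List.isEmpty_iff] using h
        rw [htake]
        rw [List.dropWhile_append]
        split
        · rename_i hemp
          rw [hdropE hemp]
          have hdb : List.dropWhile pvNotSpace (' ' :: b) = ' ' :: b := by
            rw [List.dropWhile_cons]
            simp [hns]
          rw [hdb, pv_split_space (show PySem.Chars.isspace ' ' = true by decide), pv_split_nil]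
          rfl
        · rename_i hemp
          have hlt : ((c :: a').dropWhile pvNotSpace).length ≤ n := by
            have h1 : ((c :: a').dropWhile pvNotSpace).length ≤ (a').length := by
              have hns2 : pvNotSpace c = true := by simp [pvNotSpace, hs']
              rw [List.dropWhile_cons]
              simp only [hns2, if_true]
              exact List.length_dropWhile_le _ _
            exact Nat.le_trans h1 (Nat.le_of_succ_le_succ ha)
          rw [ih _ hlt b]
          simp

theorem pv_split_join (l : List (List Char)) :
    PySem.Chars.split₀ (PySem.Chars.join [' '] l) = l.flatMap PySem.Chars.split₀ := by
  induction l with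
  | nil => simp [PySem.Chars.join, List.intercalate, PySem.Chars.split₀, PySem.Chars.split₀.go]
  | cons x xs ih =>
    match xs with
    | [] => simp [PySem.Chars.join, List.intercalate, PySem.Chars.split₀]
    | y :: ys =>
      have hj : PySem.Chars.join [' '] (x :: y :: ys) = x ++ ' ' :: PySem.Chars.join [' '] (y :: ys) := by
        simp [PySem.Chars.join, List.intercalate, List.intersperse]
      rw [hj, pv_split_append (x.length) x (Nat.le_refl _), ih]
      simp

-- join with empty separator is flatten
theorem pv_join_nil (l : List (List Char)) : PySem.Chars.join [] l = l.flatten := by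
  induction l with
  | nil => rfl
  | cons x xs ih =>
    match xs with
    | [] => simp [PySem.Chars.join, List.intercalate]
    | y :: ys =>
      have : PySem.Chars.join [] (x :: y :: ys) = x ++ PySem.Chars.join [] (y :: ys) := by
        simp [PySem.Chars.join, List.intercalate, List.intersperse]
      rw [this, ih]
      simp

theorem pv_join_cons (x : List Char) (xs : List (List Char)) :
    PySem.Chars.join [' '] (x :: xs)
      = x ++ (if xs.isEmpty then [] else ' ' :: PySem.Chars.join [' '] xs) := by
  match xs with
  | [] => simp [PySem.Chars.join, List.intercalate]
  | y :: ys => simp [PySem.Chars.join, List.intercalate, List.intersperse]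

-- B's scan computes A's ' '.join of the processed words
theorem pv_scan_spec : ∀ (n : Nat) (cs : List Char), cs.length ≤ n → ∀ res,
    PySem.Chars.join [] (pvScan cs res)
      = PySem.Chars.join [] res
        ++ (if PySem.Chars.split₀ cs = [] then []
            else (if res.isEmpty then [] else [' '])
              ++ PySem.Chars.join [' '] ((PySem.Chars.split₀ cs).map pvProc)) := by
  intro n
  induction n with
  | zero =>
    intro cs hcs res
    have : cs = [] := List.length_eq_zero_iff.mp (Nat.le_zero.mp hcs)
    subst this
    simp [pvScan, PySem.Chars.split₀, PySem.Chars.split₀.go]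
  | succ n ih =>
    intro cs hcs res
    match cs with
    | [] => simp [pvScan, PySem.Chars.split₀, PySem.Chars.split₀.go]
    | c :: rest =>
      by_cases hs : PySem.Chars.isspace c
      · rw [show pvScan (c :: rest) res = pvScan rest res by rw [pvScan]; simp [hs]]
        rw [pv_split_space hs]
        exact ih rest (Nat.le_of_succ_le_succ hcs) res
      · have hs' : PySem.Chars.isspace c = false := by simpa using hs
        have hns : pvNotSpace c = true := by simp [pvNotSpace, hs']
        rw [show pvScan (c :: rest) res
            = pvScan ((c :: rest).dropWhile pvNotSpace)
                ((if res.isEmpty then res else res ++ [[' ']])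
                  ++ [if PySem.Chars.startswith ((c :: rest).takeWhile pvNotSpace) "#".toList
                      then pvWrap ((c :: rest).takeWhile pvNotSpace)
                      else (c :: rest).takeWhile pvNotSpace]) by rw [pvScan]; simp [hs]]
        have hlen : ((c :: rest).dropWhile pvNotSpace).length ≤ n := by
          rw [List.dropWhile_cons]
          simp only [hns, if_true]
          exact Nat.le_trans (List.length_dropWhile_le _ _) (Nat.le_of_succ_le_succ hcs)
        rw [ih _ hlen]
        rw [pv_split_tok hs']
        set tok := (c :: rest).takeWhile pvNotSpace with htok
        set d := (c :: rest).dropWhile pvNotSpace with hd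
        have hpiece : (if PySem.Chars.startswith tok "#".toList then pvWrap tok else tok) = pvProc tok := rfl
        rw [hpiece]
        simp only [List.map_cons, pv_join_cons (pvProc tok)]
        have hres' : ((if res.isEmpty then res else res ++ [[' ']]) ++ [pvProc tok]).isEmpty = false := by
          split <;> simp
        rw [hres']
        simp only [pv_join_nil]
        by_cases hres : res.isEmpty
        · have : res = [] := by simpa [List.isEmpty_iff] using hres
          subst this
          by_cases hsd : PySem.Chars.split₀ d = []
          · simp [hsd]
          · simp [hsd]
        · by_cases hsd : PySem.Chars.split₀ d = []
          · simp [hsd, hres, List.flatten_append]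
          · simp [hsd, hres, List.flatten_append]

-- the two key strings agree
theorem pv_keystr (key_list : List (List (String × String))) :
    PySem.Chars.join [' ']
      (key_list.foldl (fun res key =>
        (PySem.Chars.split₀ (pvGetContent key).toList).foldl (fun res item =>
          if PySem.Chars.startswith item "#".toList then res ++ [pvWrap item]
          else res ++ [item]) res) [])
    = PySem.Chars.join []
        (pvScan (PySem.Chars.join [' '] (key_list.map (fun key => (pvGetContent key).toList))) []) := by
  rw [pv_outer_foldl, List.nil_append]
  set text := PySem.Chars.join [' '] (key_list.map (fun key => (pvGetContent key).toList)) with htext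
  rw [pv_scan_spec text.length text (Nat.le_refl _) []]
  have hsplit : PySem.Chars.split₀ text
      = key_list.flatMap (fun key => PySem.Chars.split₀ (pvGetContent key).toList) := by
    rw [htext, pv_split_join, List.flatMap_map]
  by_cases h : PySem.Chars.split₀ text = []
  · rw [h] at hsplit
    rw [← hsplit, h]
    simp [PySem.Chars.join, List.intercalate, List.intersperse]
  · simp only [h, if_false, List.isEmpty_nil, if_true, List.nil_append]
    rw [hsplit]
    simp [PySem.Chars.join, List.intercalate, List.intersperse]

-- ===== VERDICT (by name: the statement is the Claim_ definition above) =====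
theorem get_tags_words_spec : Claim_equal_get_tags_words := by
  intro key_list _ hpre
  unfold Spec_get_tags_words
  unfold get_tags_words get_tags_words_alt
  match key_list with
  | [] => exact absurd rfl hpre.1
  | k0 :: ks =>
    simp only
    rw [pv_keystr (k0 :: ks)]
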